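-- pv_equiv track=rewrite | github.com/liuguangxi/defi_turing | Codes/dt227.py | count_M_for_k_refined
-- ===== SOURCE A (Python) =====
-- def count_M_for_k_refined(n, k):
--     """
--     Counts permutations sigma of {1, ..., n} such that:
--     1. sigma(k) = k (fixed point)
--     2. sigma(1) = n
--     3. The set of absolute differences {|i - sigma(i)| : i = 1, ..., n}
--        is a permutation of {0, 1, ..., n-1}.
--     """
--     if k == 1 or k == n:
--         return 0
--
--     # Remaining positions to map: {2, 3, ..., n} \ {k}
--     # Remaining values available: {1, 2, ..., n-1} \ {k}
--     pos_rem = [i for i in range(2, n + 1) if i != k]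
--     val_rem = [i for i in range(1, n) if i != k]
--
--     # Memoization table to optimize the backtracking
--     memo = {}
--
--     def backtrack(pos_idx, used_vals_mask, used_diffs_mask):
--         state = (pos_idx, used_vals_mask, used_diffs_mask)
--         if state in memo:
--             return memo[state]
--
--         if pos_idx == len(pos_rem):
--             return 1
--
--         p = pos_rem[pos_idx]
--         res = 0
--         for i, v in enumerate(val_rem):
--             # Check if value has been used
--             if not (used_vals_mask & (1 << i)):
--                 d = abs(p - v)
--                 # Differences must be distinct and non-zero (since k is the only fixed point)
--                 if d > 0 and d < n - 1:
--                     d_bit = 1 << (d - 1)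
--                     if not (used_diffs_mask & d_bit):
--                         res += backtrack(pos_idx + 1, used_vals_mask | (1 << i), used_diffs_mask | d_bit)
--
--         memo[state] = res
--         return res
--
--     # sigma(k) = k and sigma(1) = n are pre-set; diffs 0 and n-1 are accounted for
--     return backtrack(0, 0, 0)
-- ===== SOURCE B (Python) =====
-- def count_M_for_k_refined(n, k):
--     if k == 1 or k == n:
--         return 0
--
--     pos_rem = [i for i in range(2, n + 1) if i != k]
--     val_rem = [i for i in range(1, n) if i != k]
--
--     # Bottom-up DP over (used_vals_mask, used_diffs_mask) states, one layer per position.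
--     states = {(0, 0): 1}
--     for p in pos_rem:
--         nxt = {}
--         for (vm, dm), c in states.items():
--             for i, v in enumerate(val_rem):
--                 if not (vm & (1 << i)):
--                     d = abs(p - v)
--                     if d > 0 and d < n - 1:
--                         d_bit = 1 << (d - 1)
--                         if not (dm & d_bit):
--                             key = (vm | (1 << i), dm | d_bit)
--                             nxt[key] = nxt.get(key, 0) + c
--         states = nxt
--     return sum(states.values())
-- ===== Notes on version B (the rewrite author's own statement) =====
-- stated objective: alternative
-- what changed: Replaces A's top-down memoized backtracking recursion over positions by a bottom-up layered DP that keeps a dict from (used-values-mask, used-diffs-mask) states to path counts, advancing one position per layer and summing the final layer.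
import Mathlib
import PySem

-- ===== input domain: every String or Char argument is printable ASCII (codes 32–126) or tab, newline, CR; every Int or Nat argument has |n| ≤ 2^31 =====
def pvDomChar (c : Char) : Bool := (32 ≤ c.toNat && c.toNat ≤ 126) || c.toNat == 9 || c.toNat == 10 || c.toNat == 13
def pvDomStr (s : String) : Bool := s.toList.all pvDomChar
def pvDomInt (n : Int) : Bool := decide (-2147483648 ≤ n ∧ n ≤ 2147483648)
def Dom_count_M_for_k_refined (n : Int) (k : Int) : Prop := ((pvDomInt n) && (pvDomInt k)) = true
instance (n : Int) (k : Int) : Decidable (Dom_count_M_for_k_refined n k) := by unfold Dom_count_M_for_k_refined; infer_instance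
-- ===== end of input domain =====

-- B replaces A's top-down memoized backtracking by a bottom-up layered DP over (used-values-mask, used-diffs-mask)
-- states; objective: alternative decomposition, same exact count. A's memo cache only speeds up the recursion and is
-- value-transparent, so A is ported as the plain recursion it computes; masks are nonnegative Python ints, held as Nat.

-- ===== PORT A =====
-- backtrack(pos_idx, used_vals_mask, used_diffs_mask): recursion on the positions still to fill
def pvBt (n : Int) (vals : List Int) : List Int → Nat → Nat → Int
  | [], _, _ => 1
  | p :: ps, vm, dm =>
    (PySem.List.enumerate vals 0).foldl
      (fun res iv =>
        if vm &&& (1 <<< iv.1.toNat) == 0 then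
          let d : Int := |p - iv.2|
          if 0 < d ∧ d < n - 1 then
            let dbit : Nat := 1 <<< (d - 1).toNat
            if dm &&& dbit == 0 then
              res + pvBt n vals ps (vm ||| (1 <<< iv.1.toNat)) (dm ||| dbit)
            else res
          else res
        else res) 0

def count_M_for_k_refined (n : Int) (k : Int) : Int :=
  if k == 1 || k == n then 0
  else
    let pos_rem := (PySem.List.pyRange 2 (n + 1) 1).filter (fun i => i != k)
    let val_rem := (PySem.List.pyRange 1 n 1).filter (fun i => i != k)
    pvBt n val_rem pos_rem 0 0

-- ===== PORT B =====
-- nxt[key] = nxt.get(key, 0) + c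
def pvBump (nxt : PySem.Dict (Nat × Nat) Int) (key : Nat × Nat) (c : Int) : PySem.Dict (Nat × Nat) Int :=
  nxt.insert key (nxt.getD key 0 + c)

-- the inner 'for i, v in enumerate(val_rem)' loop for one current state sc = ((vm, dm), c)
def pvInner (n : Int) (vals : List Int) (p : Int) (sc : (Nat × Nat) × Int)
    (nxt : PySem.Dict (Nat × Nat) Int) : PySem.Dict (Nat × Nat) Int :=
  (PySem.List.enumerate vals 0).foldl
    (fun nxt iv =>
      if sc.1.1 &&& (1 <<< iv.1.toNat) == 0 then
        let d : Int := |p - iv.2|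
        if 0 < d ∧ d < n - 1 then
          let dbit : Nat := 1 <<< (d - 1).toNat
          if sc.1.2 &&& dbit == 0 then
            pvBump nxt (sc.1.1 ||| (1 <<< iv.1.toNat), sc.1.2 ||| dbit) sc.2
          else nxt
        else nxt
      else nxt) nxt

-- one position layer: build nxt from every current state
def pvStep (n : Int) (vals : List Int) (states : PySem.Dict (Nat × Nat) Int) (p : Int) :
    PySem.Dict (Nat × Nat) Int :=
  states.items.foldl (fun nxt sc => pvInner n vals p sc nxt) PySem.Dict.empty

def count_M_for_k_refined_alt (n : Int) (k : Int) : Int :=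
  if k == 1 || k == n then 0
  else
    let pos_rem := (PySem.List.pyRange 2 (n + 1) 1).filter (fun i => i != k)
    let val_rem := (PySem.List.pyRange 1 n 1).filter (fun i => i != k)
    let final := pos_rem.foldl (pvStep n val_rem) (PySem.Dict.ofList [((0, 0), 1)])
    final.values.sum

-- ===== PRECONDITION & SPEC =====
def Spec_count_M_for_k_refined (n : Int) (k : Int) (out : Int) : Prop := out = count_M_for_k_refined_alt n k
instance (n : Int) (k : Int) (out : Int) : Decidable (Spec_count_M_for_k_refined n k out) := by unfold Spec_count_M_for_k_refined; infer_instance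

-- ===== CLAIM (what is proved, stated in full; the proofs are below) =====
def Claim_equal_count_M_for_k_refined : Prop := ∀ (n : Int) (k : Int), Dom_count_M_for_k_refined n k → Spec_count_M_for_k_refined n k (count_M_for_k_refined n k)


-- ===== LEMMAS AND PROOFS =====

-- the common transition relation and the weighted-sum invariant used to relate the two programs
def pvTr (n : Int) (p : Int) (s : Nat × Nat) (iv : Int × Int) : Option (Nat × Nat) :=
  if s.1 &&& (1 <<< iv.1.toNat) == 0 then
    let d : Int := |p - iv.2|
    if 0 < d ∧ d < n - 1 then
      let dbit : Nat := 1 <<< (d - 1).toNat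
      if s.2 &&& dbit == 0 then some (s.1 ||| (1 <<< iv.1.toNat), s.2 ||| dbit)
      else none
    else none
  else none

def pvWS (f : Nat × Nat → Int) (l : List ((Nat × Nat) × Int)) : Int :=
  (l.map (fun sc => sc.2 * f sc.1)).sum

theorem pvWS_replace (f : Nat × Nat → Int) :
    ∀ (l : List ((Nat × Nat) × Int)), (l.map Prod.fst).Nodup →
      ∀ (key : Nat × Nat) (v w : Int), (key, w) ∈ l →
      pvWS f (l.map (fun q => if q.1 == key then (key, v) else q)) = pvWS f l + (v - w) * f key := by
  intro l
  induction l with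
  | nil => intro _ key v w hm; simp at hm
  | cons a l ih =>
    intro hnd key v w hm
    simp only [List.map_cons, List.nodup_cons] at hnd
    by_cases ha : a.1 = key
    · have hw : a = (key, w) := by
        rcases List.mem_cons.mp hm with h | h
        · exact h.symm
        · exact absurd (ha ▸ List.mem_map_of_mem h) hnd.1
      have htl : l.map (fun q => if q.1 == key then (key, v) else q) = l := by
        have h0 : ∀ q ∈ l, (if q.1 == key then ((key, v) : (Nat × Nat) × Int) else q) = id q := by
          intro q hq
          have : q.1 ≠ key := by
            intro hq1
            exact hnd.1 (by rw [ha, ← hq1]; exact List.mem_map_of_mem hq)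
          simp [this]
        rw [List.map_congr_left h0, List.map_id]
      simp only [pvWS, List.map_cons, List.sum_cons] at *
      rw [htl]
      subst hw
      simp only [beq_self_eq_true, if_pos]
      ring
    · have hm' : (key, w) ∈ l := by
        rcases List.mem_cons.mp hm with h | h
        · exact absurd (by rw [← h]) ha
        · exact h
      have hrec := ih hnd.2 key v w hm'
      have hhead : (if a.1 == key then ((key, v) : (Nat × Nat) × Int) else a) = a := by simp [ha]
      simp only [pvWS, List.map_cons, List.sum_cons] at *
      rw [hhead, hrec]
      ring

theorem pvWS_bump (f : Nat × Nat → Int) (d : PySem.Dict (Nat × Nat) Int) (hnd : d.keys.Nodup)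
    (key : Nat × Nat) (c : Int) :
    pvWS f (pvBump d key c).items = pvWS f d.items + c * f key := by
  unfold pvBump
  by_cases hc : d.contains key = true
  · have hsome : (d.get? key).isSome := by rw [← PySem.Dict.contains_eq_isSome_get?]; exact hc
    obtain ⟨w, hw⟩ := Option.isSome_iff_exists.mp hsome
    have hgd : d.getD key 0 = w := PySem.Dict.getD_of_get?_eq_some d 0 hw
    have hmem : (key, w) ∈ d.items := PySem.Dict.mem_items_of_get?_eq_some d hw
    rw [PySem.Dict.items_insert_of_contains d _ hc, hgd]
    have hnd' : (d.items.map Prod.fst).Nodup := hnd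
    rw [pvWS_replace f d.items hnd' key (w + c) w hmem]
    ring
  · rw [PySem.Dict.items_insert_of_not_contains d _ (by simpa using hc),
        PySem.Dict.getD_of_not_contains d 0 (by simpa using hc)]
    simp [pvWS]

theorem pv_foldl_filterMap {α σ β : Type} (g : α → Option σ) (h : β → σ → β) :
    ∀ (es : List α) (b : β),
      es.foldl (fun b e => (g e).elim b (h b)) b = (es.filterMap g).foldl h b := by
  intro es
  induction es with
  | nil => intro b; rfl
  | cons e es ih =>
    intro b
    simp only [List.foldl_cons, List.filterMap_cons]
    cases hg : g e with
    | none => exact ih b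
    | some s => exact ih (h b s)

theorem pvBump_nodup (d : PySem.Dict (Nat × Nat) Int) (hnd : d.keys.Nodup) (key : Nat × Nat) (c : Int) :
    (pvBump d key c).keys.Nodup := PySem.Dict.nodup_keys_insert _ _ _ hnd

theorem pvBt_cons (n : Int) (vals : List Int) (p : Int) (ps : List Int) (vm dm : Nat) :
    pvBt n vals (p :: ps) vm dm =
      (((PySem.List.enumerate vals 0).filterMap (pvTr n p (vm, dm))).map
        (fun s' => pvBt n vals ps s'.1 s'.2)).sum := by
  have hfun : (fun (res : Int) (iv : Int × Int) =>
        if vm &&& (1 <<< iv.1.toNat) == 0 then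
          let d : Int := |p - iv.2|
          if 0 < d ∧ d < n - 1 then
            let dbit : Nat := 1 <<< (d - 1).toNat
            if dm &&& dbit == 0 then
              res + pvBt n vals ps (vm ||| (1 <<< iv.1.toNat)) (dm ||| dbit)
            else res
          else res
        else res)
      = (fun res iv => (pvTr n p (vm, dm) iv).elim res
          (fun s => res + pvBt n vals ps s.1 s.2)) := by
    funext res iv
    simp only [pvTr]
    split_ifs <;> rfl
  show (PySem.List.enumerate vals 0).foldl _ 0 = _
  rw [hfun, pv_foldl_filterMap (pvTr n p (vm, dm)) (fun res s => res + pvBt n vals ps s.1 s.2),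
      PySem.List.foldl_add]
  simp

theorem pvInner_eq (n : Int) (vals : List Int) (p : Int) (sc : (Nat × Nat) × Int)
    (nxt : PySem.Dict (Nat × Nat) Int) :
    pvInner n vals p sc nxt =
      ((PySem.List.enumerate vals 0).filterMap (pvTr n p sc.1)).foldl
        (fun d s => pvBump d s sc.2) nxt := by
  have hfun : (fun (nxt : PySem.Dict (Nat × Nat) Int) (iv : Int × Int) =>
        if sc.1.1 &&& (1 <<< iv.1.toNat) == 0 then
          let d : Int := |p - iv.2|
          if 0 < d ∧ d < n - 1 then
            let dbit : Nat := 1 <<< (d - 1).toNat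
            if sc.1.2 &&& dbit == 0 then
              pvBump nxt (sc.1.1 ||| (1 <<< iv.1.toNat), sc.1.2 ||| dbit) sc.2
            else nxt
          else nxt
        else nxt)
      = (fun d iv => (pvTr n p sc.1 iv).elim d (fun s => pvBump d s sc.2)) := by
    funext d iv
    simp only [pvTr]
    split_ifs <;> rfl
  show (PySem.List.enumerate vals 0).foldl _ nxt = _
  rw [hfun, pv_foldl_filterMap (pvTr n p sc.1) (fun d s => pvBump d s sc.2)]

theorem pv_fold_bump (f : Nat × Nat → Int) (c : Int) :
    ∀ (ts : List (Nat × Nat)) (nxt : PySem.Dict (Nat × Nat) Int), nxt.keys.Nodup →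
      (ts.foldl (fun d s => pvBump d s c) nxt).keys.Nodup ∧
      pvWS f (ts.foldl (fun d s => pvBump d s c) nxt).items = pvWS f nxt.items + c * (ts.map f).sum := by
  intro ts
  induction ts with
  | nil => intro nxt hnd; simp [hnd]
  | cons t ts ih =>
    intro nxt hnd
    obtain ⟨h1, h2⟩ := ih (pvBump nxt t c) (pvBump_nodup nxt hnd t c)
    refine ⟨h1, ?_⟩
    simp only [List.foldl_cons, List.map_cons, List.sum_cons]
    rw [h2, pvWS_bump f nxt hnd t c]
    ring

theorem pvInner_spec (n : Int) (vals : List Int) (p : Int) (ps : List Int) (sc : (Nat × Nat) × Int)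
    (nxt : PySem.Dict (Nat × Nat) Int) (hnd : nxt.keys.Nodup) :
    (pvInner n vals p sc nxt).keys.Nodup ∧
    pvWS (fun s => pvBt n vals ps s.1 s.2) (pvInner n vals p sc nxt).items =
      pvWS (fun s => pvBt n vals ps s.1 s.2) nxt.items + sc.2 * pvBt n vals (p :: ps) sc.1.1 sc.1.2 := by
  rw [pvInner_eq]
  obtain ⟨h1, h2⟩ := pv_fold_bump (fun s => pvBt n vals ps s.1 s.2) sc.2
    ((PySem.List.enumerate vals 0).filterMap (pvTr n p sc.1)) nxt hnd
  refine ⟨h1, ?_⟩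
  rw [h2, pvBt_cons]

theorem pvStep_spec (n : Int) (vals : List Int) (p : Int) (ps : List Int)
    (d : PySem.Dict (Nat × Nat) Int) :
    (pvStep n vals d p).keys.Nodup ∧
    pvWS (fun s => pvBt n vals ps s.1 s.2) (pvStep n vals d p).items =
      pvWS (fun s => pvBt n vals (p :: ps) s.1 s.2) d.items := by
  unfold pvStep
  have aux : ∀ (L : List ((Nat × Nat) × Int)) (nxt : PySem.Dict (Nat × Nat) Int), nxt.keys.Nodup →
      (L.foldl (fun nxt sc => pvInner n vals p sc nxt) nxt).keys.Nodup ∧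
      pvWS (fun s => pvBt n vals ps s.1 s.2) (L.foldl (fun nxt sc => pvInner n vals p sc nxt) nxt).items =
        pvWS (fun s => pvBt n vals ps s.1 s.2) nxt.items +
          pvWS (fun s => pvBt n vals (p :: ps) s.1 s.2) L := by
    intro L
    induction L with
    | nil => intro nxt hnd; simp [hnd, pvWS]
    | cons sc L ih =>
      intro nxt hnd
      obtain ⟨g1, g2⟩ := pvInner_spec n vals p ps sc nxt hnd
      obtain ⟨h1, h2⟩ := ih (pvInner n vals p sc nxt) g1
      refine ⟨h1, ?_⟩
      simp only [List.foldl_cons]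
      rw [h2, g2]
      simp only [pvWS, List.map_cons, List.sum_cons]
      ring
  obtain ⟨h1, h2⟩ := aux d.items PySem.Dict.empty (by simp)
  refine ⟨h1, ?_⟩
  rw [h2]
  simp [pvWS, PySem.Dict.empty]

theorem pv_outer (n : Int) (vals : List Int) :
    ∀ (ps : List Int) (d : PySem.Dict (Nat × Nat) Int),
      (ps.foldl (pvStep n vals) d).values.sum = pvWS (fun s => pvBt n vals ps s.1 s.2) d.items := by
  intro ps
  induction ps with
  | nil =>
    intro d
    simp only [List.foldl_nil, pvWS, pvBt, mul_one]
    rfl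
  | cons p ps ih =>
    intro d
    simp only [List.foldl_cons]
    rw [ih (pvStep n vals d p), (pvStep_spec n vals p ps d).2]

-- ===== VERDICT (by name: the statement is the Claim_ definition above) =====
theorem count_M_for_k_refined_spec : Claim_equal_count_M_for_k_refined := by
  intro n k _
  unfold Spec_count_M_for_k_refined count_M_for_k_refined count_M_for_k_refined_alt
  split_ifs with h
  · rfl
  · rw [pv_outer]
    have hitems : (PySem.Dict.ofList [(((0 : Nat), (0 : Nat)), (1 : Int))]).items = [((0, 0), 1)] := rfl
    rw [hitems]
    simp [pvWS]
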